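-- pv_equiv track=rewrite | github.com/Pulkit-Garg766/cll_798_Projct_2023CH71066_Pulkit_Garg_Self-Organized_Criticality_in_a_Two-Good_Barter_Economy | soc_sim.py | extract_cascades
-- ===== SOURCE A (Python) =====
-- def extract_cascades(deaths, window=1):
--     """Group deaths where successive events are within `window` ticks."""
--     if not deaths:
--         return []
--     deaths = sorted(deaths)
--     cascades, cur, last = [], 1, deaths[0][0]
--     for (t, _) in deaths[1:]:
--         if t - last <= window:
--             cur += 1
--         else:
--             cascades.append(cur)
--             cur = 1
--         last = t
--     cascades.append(cur)
--     return cascades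
-- ===== SOURCE B (Python) =====
-- def extract_cascades(deaths, window=1):
--     """Group deaths where successive events are within `window` ticks."""
--     times = [t for (t, _) in sorted(deaths)]
--
--     def sizes(ts):
--         if not ts:
--             return []
--         k = 1
--         while k < len(ts) and ts[k] - ts[k - 1] <= window:
--             k += 1
--         return [k] + sizes(ts[k:])
--
--     return sizes(times)
-- ===== Notes on version B (the rewrite author's own statement) =====
-- stated objective: alternative
-- what changed: Replaces A's single pass with a running counter/last-time state by a recursive group-splitter that consumes each maximal chained run of sorted times and recurses on the remainder (empty guard becomes the recursion base case).
import Mathlib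
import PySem

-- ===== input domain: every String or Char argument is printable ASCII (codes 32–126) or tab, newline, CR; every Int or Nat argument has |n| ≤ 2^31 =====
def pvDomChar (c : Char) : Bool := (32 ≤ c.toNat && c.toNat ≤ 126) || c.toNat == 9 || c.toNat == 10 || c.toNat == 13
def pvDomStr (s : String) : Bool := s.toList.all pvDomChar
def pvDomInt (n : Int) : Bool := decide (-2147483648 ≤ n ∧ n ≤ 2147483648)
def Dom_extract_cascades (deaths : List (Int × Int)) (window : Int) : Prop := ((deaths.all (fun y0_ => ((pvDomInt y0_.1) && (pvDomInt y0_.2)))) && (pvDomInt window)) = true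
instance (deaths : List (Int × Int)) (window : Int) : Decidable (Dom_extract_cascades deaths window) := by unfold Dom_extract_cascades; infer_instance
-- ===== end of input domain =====

-- B replaces A's running counter/last-time fold by recursive maximal-run splitting; same cost (objective: alternative).

-- ===== PORT A =====
def extract_cascades (deaths : List (Int × Int)) (window : Int) : List Int :=
  if deaths = [] then []
  else
    let d := PySem.List.sorted2 deaths (fun p => p.1) (fun p => p.2)
    let s := (PySem.List.slice d (some 1) none).foldl
      (fun (st : List Int × Int × Int) (p : Int × Int) =>
        if p.1 - st.2.2 ≤ window then (st.1, st.2.1 + 1, p.1)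
        else (st.1 ++ [st.2.1], 1, p.1))
      ([], 1, (d.headD (0, 0)).1)
    s.1 ++ [s.2.1]

-- ===== PORT B =====
-- Source B's inner while loop: consume the chained elements after `last`, return (count consumed, remainder)
def pvTakeRun (window last : Int) : List Int → Nat × List Int
  | [] => (0, [])
  | t :: ts =>
    if t - last ≤ window then
      let p := pvTakeRun window t ts
      (p.1 + 1, p.2)
    else (0, t :: ts)

theorem pvTakeRun_len (window last : Int) : ∀ ts : List Int, (pvTakeRun window last ts).2.length ≤ ts.length := by
  intro ts
  induction ts generalizing last with
  | nil => simp [pvTakeRun]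
  | cons t ts ih =>
    simp only [pvTakeRun]
    split
    · exact Nat.le_succ_of_le (ih t)
    · exact Nat.le_refl _

-- Source B's recursive `sizes`: size of the maximal chained run, then recurse on the rest
def pvSizes (window : Int) : List Int → List Int
  | [] => []
  | t :: ts =>
    let p := pvTakeRun window t ts
    ((p.1 : Int) + 1) :: pvSizes window p.2
  termination_by ts => ts.length
  decreasing_by
    simpa using Nat.lt_succ_of_le (pvTakeRun_len window t ts)

def extract_cascades_alt (deaths : List (Int × Int)) (window : Int) : List Int :=
  pvSizes window ((PySem.List.sorted2 deaths (fun p => p.1) (fun p => p.2)).map (fun p => p.1))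

-- ===== PRECONDITION & SPEC =====
def Spec_extract_cascades (deaths : List (Int × Int)) (window : Int) (out : List Int) : Prop := out = extract_cascades_alt deaths window
instance (deaths : List (Int × Int)) (window : Int) (out : List Int) : Decidable (Spec_extract_cascades deaths window out) := by unfold Spec_extract_cascades; infer_instance

-- ===== CLAIM (what is proved, stated in full; the proofs are below) =====
def Claim_equal_extract_cascades : Prop := ∀ (deaths : List (Int × Int)) (window : Int), Dom_extract_cascades deaths window → Spec_extract_cascades deaths window (extract_cascades deaths window)

-- ===== LEMMAS AND PROOFS =====

-- Abstract form of A's remaining loop from state (cur, last): the list of cascade sizes it will still emit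
def pvF (w cur last : Int) : List Int → List Int
  | [] => [cur]
  | t :: ts => if t - last ≤ w then pvF w (cur + 1) t ts else cur :: pvF w 1 t ts

theorem pvFoldl_eq_pvF (w : Int) : ∀ (ts : List (Int × Int)) (cas : List Int) (cur last : Int),
    (ts.foldl
      (fun (st : List Int × Int × Int) (p : Int × Int) =>
        if p.1 - st.2.2 ≤ w then (st.1, st.2.1 + 1, p.1)
        else (st.1 ++ [st.2.1], 1, p.1))
      (cas, cur, last)).1 ++
    [(ts.foldl
      (fun (st : List Int × Int × Int) (p : Int × Int) =>
        if p.1 - st.2.2 ≤ w then (st.1, st.2.1 + 1, p.1)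
        else (st.1 ++ [st.2.1], 1, p.1))
      (cas, cur, last)).2.1] = cas ++ pvF w cur last (ts.map (fun p => p.1)) := by
  intro ts
  induction ts with
  | nil => intro cas cur last; simp [pvF]
  | cons p ts ih =>
    intro cas cur last
    simp only [List.foldl_cons, List.map_cons, pvF]
    by_cases h : p.1 - last ≤ w
    · simp only [h, if_pos]
      exact ih cas (cur + 1) p.1
    · simp only [h, if_false]
      rw [ih (cas ++ [cur]) 1 p.1]
      simp
theorem pvF_eq_sizes (w : Int) : ∀ (ts : List Int) (cur last : Int),
    pvF w cur last ts = (cur + ((pvTakeRun w last ts).1 : Int)) :: pvSizes w (pvTakeRun w last ts).2 := by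
  intro ts
  induction ts with
  | nil => intro cur last; simp [pvF, pvTakeRun, pvSizes]
  | cons t ts ih =>
    intro cur last
    simp only [pvF, pvTakeRun]
    by_cases h : t - last ≤ w
    · simp only [h, if_pos]
      rw [ih (cur + 1) t]
      push_cast
      ring_nf
    · simp only [h, ite_false]
      rw [ih 1 t]
      rw [pvSizes]
      simp only [Nat.cast_zero, add_zero]
      congr 1
      ring_nf

-- ===== VERDICT (by name: the statement is the Claim_ definition above) =====
theorem extract_cascades_spec : Claim_equal_extract_cascades := by
  unfold Claim_equal_extract_cascades
  intro deaths window _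
  unfold Spec_extract_cascades extract_cascades extract_cascades_alt
  by_cases hd : deaths = []
  · subst hd; simp [PySem.List.sorted2, pvSizes]
  · simp only [hd, ite_false]
    obtain ⟨p0, rest, hcons⟩ : ∃ p0 rest, PySem.List.sorted2 deaths (fun p => p.1) (fun p => p.2) = p0 :: rest := by
      rcases h : PySem.List.sorted2 deaths (fun p => p.1) (fun p => p.2) with _ | ⟨p0, rest⟩
      · exfalso
        have := PySem.List.sorted2_perm (xs := deaths) (k1 := fun p : Int × Int => p.1) (k2 := fun p : Int × Int => p.2) (rev := false)
        rw [h] at this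
        exact hd (this.symm.eq_nil)
      · exact ⟨p0, rest, rfl⟩
    rw [hcons]
    simp only [List.headD_cons, PySem.List.slice_from_one, List.tail_cons]
    rw [pvFoldl_eq_pvF window rest [] 1 p0.1]
    rw [pvF_eq_sizes]
    simp only [List.map_cons, List.nil_append]
    rw [pvSizes]
    congr 1
    ring
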